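-- pv_equiv track=rewrite | github.com/aaryan13g/randomly-leetcoding | Contests/max_subsequence_count.py | maximumSubsequenceCount
-- ===== SOURCE A (Python) =====
-- def maximumSubsequenceCount(text: str, pattern: str) -> int:
--     first_occ, second_occ = [], []
--     for i in range(len(text)):
--         if text[i] == pattern[0]:
--             first_occ.append(i)
--         if text[i] == pattern[1]:
--             second_occ.append(i)
--     cnt = 0
--     ptr = 0
--     m, n = len(first_occ), len(second_occ)
--     if pattern[0] == pattern[1]:
--         return (m * (m + 1)) // 2
--     for i in first_occ:
--         while ptr < n and i > second_occ[ptr]: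
--             ptr += 1
--         cnt = cnt + n - ptr
--     return max(cnt + m, cnt + n)
-- ===== SOURCE B (Python) =====
-- def maximumSubsequenceCount(text: str, pattern: str) -> int:
--     p0, p1 = pattern[0], pattern[1]
--     cnt_a = cnt_b = total = 0
--     for ch in text:
--         if ch == p1:
--             total += cnt_a
--             cnt_b += 1
--         if ch == p0:
--             cnt_a += 1
--     return total + max(cnt_a, cnt_b)
-- ===== Notes on version B (the rewrite author's own statement) =====
-- stated objective: simpler
-- what changed: Replaces A's occurrence-index lists plus two-pointer merge with a single counting pass over text maintaining counts of pattern[0]/pattern[1] and a running pair total, returning total + max(counts); no index lists, no special case for equal pattern characters.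
import Mathlib
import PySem

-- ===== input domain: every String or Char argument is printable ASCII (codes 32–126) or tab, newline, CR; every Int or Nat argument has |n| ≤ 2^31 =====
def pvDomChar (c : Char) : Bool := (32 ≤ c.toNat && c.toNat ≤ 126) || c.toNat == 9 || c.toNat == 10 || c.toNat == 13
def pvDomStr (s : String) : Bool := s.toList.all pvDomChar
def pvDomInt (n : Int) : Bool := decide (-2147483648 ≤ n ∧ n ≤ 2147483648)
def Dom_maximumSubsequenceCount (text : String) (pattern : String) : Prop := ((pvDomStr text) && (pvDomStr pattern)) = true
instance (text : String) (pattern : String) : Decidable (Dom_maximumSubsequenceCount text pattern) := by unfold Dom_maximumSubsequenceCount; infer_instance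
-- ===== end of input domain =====

-- B replaces A's occurrence-index lists and two-pointer merge by one pass keeping two
-- character counts and a running pair total: simpler, same O(n) cost.

-- ===== PORT A =====
-- the inner `while ptr < n and i > second_occ[ptr]` loop (ptr stays a nonnegative index)
def pvWhileA (S : List Int) (i : Int) (ptr : Nat) : Nat :=
  if _h : ptr < S.length ∧ S.getD ptr 0 < i then pvWhileA S i (ptr + 1) else ptr
termination_by S.length - ptr

def maximumSubsequenceCount (text : String) (pattern : String) : Int :=
  let tl := text.toList
  -- pattern[0] / pattern[1]: in range under Pre_ (2 ≤ len pattern); default never read there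
  let p0 := (PySem.Str.pyGet? pattern 0).getD ' '
  let p1 := (PySem.Str.pyGet? pattern 1).getD ' '
  let occ := (PySem.List.pyRange 0 (tl.length : Int) 1).foldl
    (fun (acc : List Int × List Int) i =>
      let acc := if PySem.List.pyGetD tl i ' ' = p0 then (acc.1 ++ [i], acc.2) else acc
      if PySem.List.pyGetD tl i ' ' = p1 then (acc.1, acc.2 ++ [i]) else acc)
    ([], [])
  let first_occ := occ.1
  let second_occ := occ.2
  let m : Int := first_occ.length
  let n : Int := second_occ.length
  if p0 = p1 then
    PySem.Int.floordiv (m * (m + 1)) 2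
  else
    let st := first_occ.foldl
      (fun (st : Int × Nat) i =>
        let ptr' := pvWhileA second_occ i st.2
        (st.1 + n - (ptr' : Int), ptr'))
      (0, 0)
    max (st.1 + m) (st.1 + n)

-- ===== PORT B =====
def maximumSubsequenceCount_alt (text : String) (pattern : String) : Int :=
  let p0 := (PySem.Str.pyGet? pattern 0).getD ' '
  let p1 := (PySem.Str.pyGet? pattern 1).getD ' '
  let st := text.toList.foldl
    (fun (st : Int × Int × Int) ch =>
      let st := if ch = p1 then (st.1, st.2.1 + 1, st.2.2 + st.1) else st
      if ch = p0 then (st.1 + 1, st.2.1, st.2.2) else st)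
    (0, 0, 0)
  st.2.2 + max st.1 st.2.1

-- ===== PRECONDITION & SPEC =====
-- Pre_ excludes exactly the inputs where the Python A raises IndexError (pattern shorter than 2).
def Pre_maximumSubsequenceCount (text : String) (pattern : String) : Prop :=
  2 ≤ pattern.toList.length
instance (text : String) (pattern : String) : Decidable (Pre_maximumSubsequenceCount text pattern) := by unfold Pre_maximumSubsequenceCount; infer_instance

def pvWitness_maximumSubsequenceCount : String × String := ("ababcb", "ab")

def Spec_maximumSubsequenceCount (text : String) (pattern : String) (out : Int) : Prop := out = maximumSubsequenceCount_alt text pattern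
instance (text : String) (pattern : String) (out : Int) : Decidable (Spec_maximumSubsequenceCount text pattern out) := by unfold Spec_maximumSubsequenceCount; infer_instance

-- ===== CLAIM (what is proved, stated in full; the proofs are below) =====
def Claim_equal_maximumSubsequenceCount : Prop := ∀ (text : String) (pattern : String), Dom_maximumSubsequenceCount text pattern → Pre_maximumSubsequenceCount text pattern → Spec_maximumSubsequenceCount text pattern (maximumSubsequenceCount text pattern)

-- ===== LEMMAS AND PROOFS =====

-- count of elements of S below i
def pvCLt (S : List Int) (i : Int) : Nat := S.countP (fun s => decide (s < i))

-- the per-first-occurrence contribution sum that A's two-pointer loop computes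
def pvSum (F S : List Int) : Int := (F.map (fun i => (S.length : Int) - (pvCLt S i : Int))).sum

theorem pvCLt_mono (S : List Int) {i j : Int} (h : i ≤ j) : pvCLt S i ≤ pvCLt S j := by
  apply List.countP_mono_left
  intro a _ ha
  simp only [decide_eq_true_eq] at *
  omega

theorem pvWhileA_correct (S : List Int) (i : Int) (ptr : Nat)
    (hs : S.Pairwise (· < ·)) (hp : ptr ≤ pvCLt S i) : pvWhileA S i ptr = pvCLt S i := by
  fun_induction pvWhileA S i ptr with
  | case1 ptr h ih =>
    apply ih
    -- the first ptr+1 elements of S are all < i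
    have hlt : ∀ k (hk : k < S.length), k ≤ ptr → S[k] < i := by
      intro k hk hkp
      rcases Nat.lt_or_ge k ptr with hlt | hge
      · have := (List.pairwise_iff_getElem.mp hs) k ptr hk h.1 hlt
        have : S[ptr] = S.getD ptr 0 := (List.getD_eq_getElem S 0 h.1).symm
        omega
      · have hk' : k = ptr := by omega
        subst hk'
        have : S[k] = S.getD k 0 := (List.getD_eq_getElem S 0 hk).symm
        omega
    -- hence countP ≥ ptr+1 : count over the prefix of length ptr+1 is ptr+1
    have : pvCLt S i = pvCLt (S.take (ptr+1)) i + pvCLt (S.drop (ptr+1)) i := by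
      unfold pvCLt
      rw [← List.countP_append, List.take_append_drop]
    have htake : pvCLt (S.take (ptr+1)) i = ptr + 1 := by
      unfold pvCLt
      rw [List.countP_eq_length.mpr]
      · simp [List.length_take]; omega
      · intro a ha
        rw [List.mem_take_iff_getElem] at ha
        obtain ⟨k, hk, rfl⟩ := ha
        simp only [decide_eq_true_eq]
        exact hlt k _ (by omega)
    omega
  | case2 ptr h =>
    have h : ptr < S.length → i ≤ S.getD ptr 0 := fun hl =>
      not_lt.mp (fun hx => h ⟨hl, hx⟩)
    rcases Nat.lt_or_ge ptr S.length with hlen | hlen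
    · -- S[ptr] ≥ i, so everything from ptr on is ≥ i: pvCLt ≤ ptr
      have hge : ∀ k (hk : k < S.length), ptr ≤ k → ¬ S[k] < i := by
        intro k hk hkp
        have hptr : i ≤ S.getD ptr 0 := h hlen
        rw [List.getD_eq_getElem S 0 hlen] at hptr
        rcases Nat.lt_or_ge ptr k with hlt | hge
        · have := (List.pairwise_iff_getElem.mp hs) ptr k hlen hk hlt
          omega
        · have : k = ptr := by omega
          subst this; omega
      have : pvCLt S i ≤ ptr := by
        have hsplit : pvCLt S i = pvCLt (S.take ptr) i + pvCLt (S.drop ptr) i := by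
          unfold pvCLt
          rw [← List.countP_append, List.take_append_drop]
        have hdrop : pvCLt (S.drop ptr) i = 0 := by
          unfold pvCLt
          rw [List.countP_eq_zero]
          intro a ha
          rw [List.mem_drop_iff_getElem] at ha
          obtain ⟨k, hk, rfl⟩ := ha
          simp only [decide_eq_true_eq]
          exact hge _ _ (by omega)
        have := List.countP_le_length (l := S.take ptr) (p := fun s => decide (s < i))
        simp [List.length_take] at this
        unfold pvCLt at *
        omega
      omega
    · have : pvCLt S i ≤ S.length := List.countP_le_length
      omega

-- A's outer loop over first_occ computes pvSum
theorem pvFold_correct (S : List Int) (hs : S.Pairwise (· < ·)) :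
    ∀ (F : List Int) (cnt : Int) (ptr : Nat), F.Pairwise (· < ·) →
    (∀ i ∈ F, ptr ≤ pvCLt S i) →
    (F.foldl (fun (st : Int × Nat) i =>
        let ptr' := pvWhileA S i st.2
        (st.1 + (S.length : Int) - (ptr' : Int), ptr')) (cnt, ptr)).1 = cnt + pvSum F S := by
  intro F
  induction F with
  | nil => intro cnt ptr _ _; simp [pvSum]
  | cons i F ih =>
    intro cnt ptr hF hptr
    have hi : ptr ≤ pvCLt S i := hptr i (by simp)
    have hw : pvWhileA S i ptr = pvCLt S i := pvWhileA_correct S i ptr hs hi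
    simp only [List.foldl_cons, hw]
    rw [ih _ _ (List.Pairwise.of_cons hF)]
    · simp [pvSum]; ring
    · intro j hj
      have hij : i < j := (List.pairwise_cons.mp hF).1 j hj
      exact le_trans (le_of_eq rfl) (pvCLt_mono S (le_of_lt hij))

-- characterisation of A's occurrence-building fold, B's fold, and their relation,
-- all in one snoc induction
def pvBuild (p0 p1 : Char) (l : List Char) : List Int × List Int :=
  (PySem.List.pyRange 0 (l.length : Int) 1).foldl
    (fun (acc : List Int × List Int) i =>
      let acc := if PySem.List.pyGetD l i ' ' = p0 then (acc.1 ++ [i], acc.2) else acc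
      if PySem.List.pyGetD l i ' ' = p1 then (acc.1, acc.2 ++ [i]) else acc)
    ([], [])

def pvFoldB (p0 p1 : Char) (l : List Char) : Int × Int × Int :=
  l.foldl
    (fun (st : Int × Int × Int) ch =>
      let st := if ch = p1 then (st.1, st.2.1 + 1, st.2.2 + st.1) else st
      if ch = p0 then (st.1 + 1, st.2.1, st.2.2) else st)
    (0, 0, 0)

theorem pvBuild_snoc (p0 p1 : Char) (l : List Char) (c : Char) :
    pvBuild p0 p1 (l ++ [c]) =
      (let acc := pvBuild p0 p1 l
       let acc := if c = p0 then (acc.1 ++ [(l.length : Int)], acc.2) else acc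
       if c = p1 then (acc.1, acc.2 ++ [(l.length : Int)]) else acc) := by
  unfold pvBuild
  have hr : PySem.List.pyRange 0 ((l.length + 1 : Nat) : Int) 1 =
      PySem.List.pyRange 0 (l.length : Int) 1 ++ [(l.length : Int)] := by
    have := PySem.List.pyRange_one_succ_right (a := 0) (b := (l.length : Int)) (by omega)
    simpa using this
  simp only [List.length_append, List.length_singleton, hr, List.foldl_append, List.foldl_cons,
    List.foldl_nil]
  rw [PySem.List.foldl_congr_mem _ _
    (fun (acc : List Int × List Int) i =>
      let acc := if PySem.List.pyGetD l i ' ' = p0 then (acc.1 ++ [i], acc.2) else acc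
      if PySem.List.pyGetD l i ' ' = p1 then (acc.1, acc.2 ++ [i]) else acc) _ ?_]
  · have hgetc : PySem.List.pyGetD (l ++ [c]) ((l.length : Nat) : Int) ' ' = c := by
      rw [PySem.List.pyGetD_natCast]
      simp [List.getD]
    rw [hgetc]
  · intro acc i hi
    have hmem := (PySem.List.mem_pyRange_one (a := 0) (b := (l.length : Int)) (x := i)).mp hi
    have hget : PySem.List.pyGetD (l ++ [c]) i ' ' = PySem.List.pyGetD l i ' ' := by
      rw [PySem.List.pyGetD_eq_getElem _ ' ' (by omega) (by simp; omega),
          PySem.List.pyGetD_eq_getElem _ ' ' (by omega) (by omega)]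
      rw [List.getElem_append_left]
    rw [hget]

theorem pvFoldB_snoc (p0 p1 : Char) (l : List Char) (c : Char) :
    pvFoldB p0 p1 (l ++ [c]) =
      (let st := pvFoldB p0 p1 l
       let st := if c = p1 then (st.1, st.2.1 + 1, st.2.2 + st.1) else st
       if c = p0 then (st.1 + 1, st.2.1, st.2.2) else st) := by
  unfold pvFoldB
  rw [List.foldl_append]
  simp

theorem pvSum_snoc_S (F S : List Int) (x : Int) (h : ∀ i ∈ F, i < x) :
    pvSum F (S ++ [x]) = pvSum F S + F.length := by
  unfold pvSum
  have hterm : ∀ i ∈ F, (((S ++ [x]).length : Int) - (pvCLt (S ++ [x]) i : Int)) =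
      (fun i => ((S.length : Int) - (pvCLt S i : Int)) + 1) i := by
    intro i hi
    have hc : pvCLt (S ++ [x]) i = pvCLt S i := by
      unfold pvCLt
      rw [List.countP_append]
      have : ¬ x < i := not_lt.mpr (le_of_lt (h i hi))
      simp [this]
    rw [hc]
    simp
    ring
  rw [List.map_congr_left hterm, PySem.List.sum_map_add_int, PySem.List.sum_map_const_int]
  ring

theorem pvSum_snoc_F (F S : List Int) (x : Int) (h : ∀ s ∈ S, s < x) :
    pvSum (F ++ [x]) S = pvSum F S := by
  unfold pvSum
  rw [List.map_append, List.sum_append]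
  have hc : pvCLt S x = S.length := by
    unfold pvCLt
    rw [List.countP_eq_length.mpr]
    intro a ha
    simp [h a ha]
  simp [hc]

-- the master invariant of the snoc induction over text
theorem pvMaster (p0 p1 : Char) (l : List Char) :
    (pvBuild p0 p1 l).1.Pairwise (· < ·) ∧
    (pvBuild p0 p1 l).2.Pairwise (· < ·) ∧
    (∀ x ∈ (pvBuild p0 p1 l).1, 0 ≤ x ∧ x < (l.length : Int)) ∧
    (∀ x ∈ (pvBuild p0 p1 l).2, 0 ≤ x ∧ x < (l.length : Int)) ∧
    ((pvBuild p0 p1 l).1.length : Int) = (pvFoldB p0 p1 l).1 ∧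
    ((pvBuild p0 p1 l).2.length : Int) = (pvFoldB p0 p1 l).2.1 ∧
    (p0 = p1 → (pvBuild p0 p1 l).1 = (pvBuild p0 p1 l).2) ∧
    (p0 ≠ p1 → pvSum (pvBuild p0 p1 l).1 (pvBuild p0 p1 l).2 = (pvFoldB p0 p1 l).2.2) ∧
    (p0 = p1 → 2 * (pvFoldB p0 p1 l).2.2 =
        ((pvBuild p0 p1 l).1.length : Int) * (((pvBuild p0 p1 l).1.length : Int) - 1)) := by
  induction l using List.reverseRecOn with
  | nil =>
    refine ⟨?_, ?_, ?_, ?_, ?_, ?_, ?_, ?_, ?_⟩ <;> simp [pvBuild, pvFoldB, pvSum, PySem.List.pyRange]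
  | append_singleton l c ih =>
    obtain ⟨hF, hS, hbF, hbS, hca, hcb, heqFS, htot, htot2⟩ := ih
    rw [pvBuild_snoc, pvFoldB_snoc]
    dsimp only
    have hlen : ((l ++ [c]).length : Int) = (l.length : Int) + 1 := by simp
    have hpairF : ((pvBuild p0 p1 l).1 ++ [(l.length : Int)]).Pairwise (· < ·) := by
      rw [List.pairwise_append]
      exact ⟨hF, List.pairwise_singleton _ _,
        fun a ha b hb => by rw [List.mem_singleton] at hb; subst hb; exact (hbF a ha).2⟩
    have hpairS : ((pvBuild p0 p1 l).2 ++ [(l.length : Int)]).Pairwise (· < ·) := by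
      rw [List.pairwise_append]
      exact ⟨hS, List.pairwise_singleton _ _,
        fun a ha b hb => by rw [List.mem_singleton] at hb; subst hb; exact (hbS a ha).2⟩
    have hbF' : ∀ x ∈ (pvBuild p0 p1 l).1 ++ [(l.length : Int)], 0 ≤ x ∧ x < ((l ++ [c]).length : Int) := by
      intro x hx
      rw [List.mem_append, List.mem_singleton] at hx
      rcases hx with hx | rfl
      · have := hbF x hx; omega
      · omega
    have hbS' : ∀ x ∈ (pvBuild p0 p1 l).2 ++ [(l.length : Int)], 0 ≤ x ∧ x < ((l ++ [c]).length : Int) := by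
      intro x hx
      rw [List.mem_append, List.mem_singleton] at hx
      rcases hx with hx | rfl
      · have := hbS x hx; omega
      · omega
    have hbF0 : ∀ x ∈ (pvBuild p0 p1 l).1, 0 ≤ x ∧ x < ((l ++ [c]).length : Int) := by
      intro x hx; have := hbF x hx; omega
    have hbS0 : ∀ x ∈ (pvBuild p0 p1 l).2, 0 ≤ x ∧ x < ((l ++ [c]).length : Int) := by
      intro x hx; have := hbS x hx; omega
    by_cases hc0 : c = p0 <;> by_cases hc1 : c = p1
    · -- c = p0 and c = p1 (so p0 = p1)
      have hp : p0 = p1 := hc0 ▸ hc1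
      have h2 := htot2 hp
      simp only [if_pos hc0, if_pos hc1]
      refine ⟨hpairF, hpairS, hbF', hbS',
        by simp only [List.length_append, List.length_singleton]; push_cast; omega,
        by simp only [List.length_append, List.length_singleton]; push_cast; omega,
        fun _ => by rw [heqFS hp], fun hne => absurd hp hne, fun _ => ?_⟩
      simp only [List.length_append, List.length_singleton]
      push_cast
      rw [← hca]
      linear_combination h2
    · -- c = p0 only
      simp only [if_pos hc0, if_neg hc1]
      refine ⟨hpairF, hS, hbF', hbS0,
        by simp only [List.length_append, List.length_singleton]; push_cast; omega,
        hcb, fun hp => absurd (hp ▸ hc0 : c = p1) hc1, fun hne => ?_,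
        fun hp => absurd (hp ▸ hc0 : c = p1) hc1⟩
      rw [pvSum_snoc_F _ _ _ (fun s hs => (hbS s hs).2)]
      exact htot hne
    · -- c = p1 only
      simp only [if_pos hc1, if_neg hc0]
      refine ⟨hF, hpairS, hbF0, hbS',
        hca,
        by simp only [List.length_append, List.length_singleton]; push_cast; omega,
        fun hp => absurd (hp ▸ hc1 : c = p0) hc0, fun hne => ?_,
        fun hp => absurd (hp ▸ hc1 : c = p0) hc0⟩
      rw [pvSum_snoc_S _ _ _ (fun i hi => (hbF i hi).2)]
      rw [htot hne, hca]
    · -- neither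
      simp only [if_neg hc0, if_neg hc1]
      exact ⟨hF, hS, hbF0, hbS0, hca, hcb, heqFS, htot, htot2⟩

-- ===== VERDICT (by name: the statement is the Claim_ definition above) =====
theorem maximumSubsequenceCount_spec : Claim_equal_maximumSubsequenceCount := by
  intro text pattern _ _
  unfold Spec_maximumSubsequenceCount maximumSubsequenceCount maximumSubsequenceCount_alt
  simp only
  set p0 := (PySem.Str.pyGet? pattern 0).getD ' ' with hp0
  set p1 := (PySem.Str.pyGet? pattern 1).getD ' ' with hp1
  set l := text.toList with hl
  obtain ⟨hF, hS, hbF, hbS, hca, hcb, heqFS, htot, htot2⟩ := pvMaster p0 p1 l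
  show (if p0 = p1 then _ else _) = _
  rw [show (PySem.List.pyRange 0 (l.length : Int) 1).foldl
      (fun (acc : List Int × List Int) i =>
        let acc := if PySem.List.pyGetD l i ' ' = p0 then (acc.1 ++ [i], acc.2) else acc
        if PySem.List.pyGetD l i ' ' = p1 then (acc.1, acc.2 ++ [i]) else acc)
      ([], []) = pvBuild p0 p1 l from rfl]
  rw [show l.foldl
      (fun (st : Int × Int × Int) ch =>
        let st := if ch = p1 then (st.1, st.2.1 + 1, st.2.2 + st.1) else st
        if ch = p0 then (st.1 + 1, st.2.1, st.2.2) else st)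
      (0, 0, 0) = pvFoldB p0 p1 l from rfl]
  by_cases hp : p0 = p1
  · rw [if_pos hp]
    have h2 := htot2 hp
    have hmm : ((pvBuild p0 p1 l).2.length : Int) = ((pvBuild p0 p1 l).1.length : Int) := by
      rw [heqFS hp]
    rw [PySem.Int.floordiv_eq_ediv_of_pos (by omega)]
    rw [← hca, ← hcb, hmm]
    rw [max_self]
    have h3 : (((pvBuild p0 p1 l).1.length : Int)) * ((((pvBuild p0 p1 l).1.length : Int)) + 1) =
        2 * ((pvFoldB p0 p1 l).2.2 + (((pvBuild p0 p1 l).1.length : Int))) := by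
      linear_combination -h2
    omega
  · rw [if_neg hp]
    have hfold := pvFold_correct (pvBuild p0 p1 l).2 hS (pvBuild p0 p1 l).1 0 0 hF
      (fun i _ => Nat.zero_le _)
    rw [hfold]
    rw [htot hp, ← hca, ← hcb]
    rw [max_def, max_def]
    split_ifs <;> [skip; skip; skip; skip] <;> push_cast at * <;> omega
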